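-- pv_equiv track=rewrite | github.com/WilliamPerezBeltran/studying_python | ejerciciso_daniel/05_serie.py | way_one_serie
-- ===== SOURCE A (Python) =====
-- def way_one_serie(n):
-- 	impar = 1
-- 	new_array = []
--
-- 	for x in range(n):
-- 		for y in range(2**x):
-- 			new_array.append(impar)
-- 		impar+=2
-- 	return new_array
-- ===== SOURCE B (Python) =====
-- def way_one_serie(n):
--     # Closed-form: element at index i is 2*((i+1).bit_length()-1)+1; no nested loops or counters.
--     if n <= 0:
--         return []
--     return [2 * ((i + 1).bit_length() - 1) + 1 for i in range(2 ** n - 1)]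
-- ===== Notes on version B (the rewrite author's own statement) =====
-- stated objective: alternative
-- what changed: Replaced A's nested accumulate-and-repeat loops (counter impar, inner 2**x-append loop) by a single pass over range(2**n-1) computing each element in closed form from its index via bit_length.
import Mathlib
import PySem

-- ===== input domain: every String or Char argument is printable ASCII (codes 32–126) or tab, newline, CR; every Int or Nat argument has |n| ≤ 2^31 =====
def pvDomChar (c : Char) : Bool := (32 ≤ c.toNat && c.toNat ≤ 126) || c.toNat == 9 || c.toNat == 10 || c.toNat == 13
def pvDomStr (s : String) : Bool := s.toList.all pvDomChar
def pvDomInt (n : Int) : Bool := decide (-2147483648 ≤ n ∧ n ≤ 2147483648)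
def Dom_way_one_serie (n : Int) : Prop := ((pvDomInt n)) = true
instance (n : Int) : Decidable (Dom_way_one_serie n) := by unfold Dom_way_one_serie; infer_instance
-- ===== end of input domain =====

-- B replaces A's nested accumulate-and-repeat loops by a closed form per index (alternative, same cost).

-- ===== PORT A =====
-- for x in range(n): for y in range(2**x): append impar; impar += 2
def way_one_serie (n : Int) : List Int :=
  ((PySem.List.pyRange 0 n 1).foldl
    (fun (s : Int × List Int) x =>
      (s.1 + 2,
       (PySem.List.pyRange 0 ((2 : Int) ^ x.toNat) 1).foldl (fun a _y => a ++ [s.1]) s.2))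
    (1, [])).2

-- ===== PORT B =====
-- int.bit_length of a nonnegative Python int (only applied to positive values here)
def pyBitLength (m : Int) : Int := if m ≤ 0 then 0 else (Nat.log2 m.toNat : Int) + 1

def way_one_serie_alt (n : Int) : List Int :=
  if n ≤ 0 then []
  else (PySem.List.pyRange 0 ((2 : Int) ^ n.toNat - 1) 1).map
        (fun i => 2 * (pyBitLength (i + 1) - 1) + 1)

-- ===== PRECONDITION & SPEC =====
def Spec_way_one_serie (n : Int) (out : List Int) : Prop := out = way_one_serie_alt n
instance (n : Int) (out : List Int) : Decidable (Spec_way_one_serie n out) := by unfold Spec_way_one_serie; infer_instance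

-- ===== CLAIM (what is proved, stated in full; the proofs are below) =====
def Claim_equal_way_one_serie : Prop := ∀ (n : Int), Dom_way_one_serie n → Spec_way_one_serie n (way_one_serie n)

-- ===== LEMMAS AND PROOFS =====

/-- The intended result: block x (0 ≤ x < k) holds 2^x copies of 2x+1. -/
def serSpec : Nat → List Int
  | 0 => []
  | k + 1 => serSpec k ++ List.replicate (2 ^ k) (2 * (k : Int) + 1)

-- A's inner loop appends m copies of c.
theorem inner_loop_eq (m : Nat) (c : Int) (arr : List Int) :
    (PySem.List.pyRange 0 (m : Int) 1).foldl (fun a (_y : Int) => a ++ [c]) arr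
      = arr ++ List.replicate m c := by
  induction m generalizing arr with
  | zero => simp
  | succ m ih =>
      have h : ((m + 1 : Nat) : Int) = (m : Int) + 1 := by push_cast; ring
      rw [h, PySem.List.pyRange_one_succ_right (by positivity), List.foldl_append, ih]
      simp [List.replicate_succ']

-- A's outer loop computes serSpec.
theorem outer_loop_eq (k : Nat) :
    (PySem.List.pyRange 0 (k : Int) 1).foldl
      (fun (s : Int × List Int) x =>
        (s.1 + 2,
         (PySem.List.pyRange 0 ((2 : Int) ^ x.toNat) 1).foldl (fun a _y => a ++ [s.1]) s.2))
      (1, []) = (2 * (k : Int) + 1, serSpec k) := by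
  induction k with
  | zero => simp [serSpec]
  | succ k ih =>
      have h : ((k + 1 : Nat) : Int) = (k : Int) + 1 := by push_cast; ring
      rw [h, PySem.List.pyRange_one_succ_right (by positivity), List.foldl_append, ih]
      simp only [List.foldl_cons, List.foldl_nil]
      rw [show ((2 : Int) ^ ((k : Int)).toNat) = (((2 ^ k : Nat) : Int)) by
            rw [Int.toNat_natCast]; push_cast; ring_nf]
      rw [inner_loop_eq]
      simp only [Prod.mk.injEq]
      exact ⟨by ring, by simp [serSpec]⟩

theorem a_eq_spec (n : Int) : way_one_serie n = serSpec n.toNat := by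
  unfold way_one_serie
  by_cases hn : n ≤ 0
  · rw [PySem.List.pyRange_one_eq_nil hn, Int.toNat_of_nonpos hn]
    rfl
  · rw [not_le] at hn
    obtain ⟨m, rfl⟩ := Int.eq_ofNat_of_zero_le hn.le
    rw [outer_loop_eq]
    simp

theorem log2_between (k m : Nat) (hl : 2 ^ k ≤ m) (hh : m < 2 ^ (k + 1)) :
    Nat.log2 m = k := by
  rw [Nat.log2_eq_log_two]
  exact Nat.log_eq_of_pow_le_of_lt_pow hl hh

-- B's map over a full range equals serSpec.
theorem b_map_eq_spec (k : Nat) :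
    (PySem.List.pyRange 0 ((2 : Int) ^ k - 1) 1).map
      (fun i => 2 * (pyBitLength (i + 1) - 1) + 1) = serSpec k := by
  induction k with
  | zero => simp [serSpec]
  | succ k ih =>
      have h1 : (0 : Int) ≤ (2 : Int) ^ k - 1 := by
        have : (1:Int) ≤ 2 ^ k := one_le_pow₀ (by norm_num)
        omega
      have h2 : (2 : Int) ^ k - 1 ≤ (2 : Int) ^ (k + 1) - 1 := by
        have : (2:Int) ^ k ≤ 2 ^ (k+1) := pow_le_pow_right₀ (by norm_num) (Nat.le_succ k)
        omega
      rw [PySem.List.pyRange_one_append 0 ((2 : Int) ^ k - 1) ((2 : Int) ^ (k + 1) - 1) h1 h2,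
        List.map_append, ih, serSpec]
      congr 1
      rw [List.eq_replicate_iff]
      constructor
      · rw [List.length_map, PySem.List.length_pyRange_one]
        rw [show ((2 : Int) ^ (k + 1) - 1) - ((2 : Int) ^ k - 1) = ((2 ^ k : Nat) : Int) by
              push_cast; rw [pow_succ]; ring]
        exact Int.toNat_natCast _
      · intro b hb
        simp only [List.mem_map] at hb
        obtain ⟨i, hi, rfl⟩ := hb
        rw [PySem.List.mem_pyRange_one] at hi
        have hip : (0 : Int) ≤ i + 1 := by linarith [hi.1, h1]
        obtain ⟨m, hm⟩ := Int.eq_ofNat_of_zero_le hip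
        have hlow : 2 ^ k ≤ m := by
          have : ((2 : Int) ^ k) ≤ (m : Int) := by rw [← hm]; linarith [hi.1]
          exact_mod_cast this
        have hhigh : m < 2 ^ (k + 1) := by
          have : ((m : Int)) < (2 : Int) ^ (k + 1) := by rw [← hm]; linarith [hi.2]
          exact_mod_cast this
        rw [hm]
        unfold pyBitLength
        have hm1 : 1 ≤ m := le_trans Nat.one_le_two_pow hlow
        rw [if_neg (by omega)]
        rw [Int.toNat_natCast, log2_between k m hlow hhigh]
        ring

theorem b_eq_spec (n : Int) : way_one_serie_alt n = serSpec n.toNat := by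
  unfold way_one_serie_alt
  split_ifs with h
  · rw [Int.toNat_of_nonpos h]; rfl
  · exact b_map_eq_spec n.toNat

-- ===== VERDICT (by name: the statement is the Claim_ definition above) =====
theorem way_one_serie_spec : Claim_equal_way_one_serie := by
  intro n _
  unfold Spec_way_one_serie
  rw [a_eq_spec, b_eq_spec]
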